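-- pv_equiv track=rewrite | github.com/jmstrober/midi-rag-web | src/document_processor.py | _infer_protocol_type
-- ===== SOURCE A (Python) =====
-- def _infer_protocol_type(filename: str) -> str:
--     """Infer the type of clinical protocol from filename."""
--     filename_lower = filename.lower()
--
--     if any(term in filename_lower for term in ['menopause', 'hormone', 'hrt']):
--         return 'menopause'
--     elif any(term in filename_lower for term in ['weight', 'obesity', 'glp1', 'semaglutide']):
--         return 'weight_management'
--     elif any(term in filename_lower for term in ['diabetes', 'glucose', 'insulin']):
--         return 'diabetes'
--     elif any(term in filename_lower for term in ['thyroid', 'tsh', 't4']):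
--         return 'thyroid'
--     elif any(term in filename_lower for term in ['sleep']):
--         return 'sleep'
--     else:
--         return 'general'
-- ===== SOURCE B (Python) =====
-- KEYWORD_LABELS = {
--     'menopause': 'menopause', 'hormone': 'menopause', 'hrt': 'menopause',
--     'weight': 'weight_management', 'obesity': 'weight_management',
--     'glp1': 'weight_management', 'semaglutide': 'weight_management',
--     'diabetes': 'diabetes', 'glucose': 'diabetes', 'insulin': 'diabetes',
--     'thyroid': 'thyroid', 'tsh': 'thyroid', 't4': 'thyroid',
--     'sleep': 'sleep',
-- }
--
-- PRIORITY = ['menopause', 'weight_management', 'diabetes', 'thyroid', 'sleep']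
--
--
-- def _infer_protocol_type(filename: str) -> str:
--     """Infer the type of clinical protocol from filename."""
--     fl = filename.lower()
--     matched = {label for kw, label in KEYWORD_LABELS.items() if kw in fl}
--     return next((label for label in PRIORITY if label in matched), 'general')
-- ===== Notes on version B (the rewrite author's own statement) =====
-- stated objective: alternative
-- what changed: Instead of short-circuiting through an if/elif cascade of grouped any() checks, B first exhaustively tests every keyword once via a flat keyword-to-label map to collect the SET of matched labels, then resolves the winner in a second pass over a separate priority list.
import Mathlib
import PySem

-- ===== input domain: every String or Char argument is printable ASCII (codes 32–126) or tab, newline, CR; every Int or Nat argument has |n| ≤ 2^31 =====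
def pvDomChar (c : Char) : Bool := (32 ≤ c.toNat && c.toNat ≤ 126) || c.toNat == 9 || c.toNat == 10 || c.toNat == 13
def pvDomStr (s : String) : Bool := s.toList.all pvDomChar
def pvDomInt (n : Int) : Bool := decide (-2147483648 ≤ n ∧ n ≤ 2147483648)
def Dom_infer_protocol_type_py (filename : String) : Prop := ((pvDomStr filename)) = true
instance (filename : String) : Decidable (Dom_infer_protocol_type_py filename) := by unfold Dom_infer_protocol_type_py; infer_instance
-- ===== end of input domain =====

-- B replaces A's short-circuiting if/elif cascade by two staged passes: an exhaustive
-- keyword scan over a flat keyword→label map collecting the SET of matched labels,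
-- then a priority-list pass picking the winning label; alternative decomposition, same cost.

-- ===== PORT A =====
def infer_protocol_type_py (filename : String) : String :=
  let filename_lower := PySem.Str.lower filename
  if ["menopause", "hormone", "hrt"].any (fun term => PySem.Str.isIn term filename_lower) then
    "menopause"
  else if ["weight", "obesity", "glp1", "semaglutide"].any (fun term => PySem.Str.isIn term filename_lower) then
    "weight_management"
  else if ["diabetes", "glucose", "insulin"].any (fun term => PySem.Str.isIn term filename_lower) then
    "diabetes"
  else if ["thyroid", "tsh", "t4"].any (fun term => PySem.Str.isIn term filename_lower) then
    "thyroid"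
  else if ["sleep"].any (fun term => PySem.Str.isIn term filename_lower) then
    "sleep"
  else
    "general"

-- ===== PORT B =====
-- KEYWORD_LABELS as an association list in insertion order (dict → List (K × V))
def pvKeywordLabels : List (String × String) :=
  [("menopause", "menopause"), ("hormone", "menopause"), ("hrt", "menopause"),
   ("weight", "weight_management"), ("obesity", "weight_management"),
   ("glp1", "weight_management"), ("semaglutide", "weight_management"),
   ("diabetes", "diabetes"), ("glucose", "diabetes"), ("insulin", "diabetes"),
   ("thyroid", "thyroid"), ("tsh", "thyroid"), ("t4", "thyroid"),
   ("sleep", "sleep")]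

def pvPriority : List String := ["menopause", "weight_management", "diabetes", "thyroid", "sleep"]

def infer_protocol_type_py_alt (filename : String) : String :=
  let fl := PySem.Str.lower filename
  -- set comprehension: build the Set of labels whose keyword occurs in fl
  let matched : PySem.Set String :=
    pvKeywordLabels.foldl
      (fun s p => if PySem.Str.isIn p.1 fl then PySem.Set.add s p.2 else s)
      PySem.Set.empty
  -- next((label for label in PRIORITY if label in matched), 'general')
  ((pvPriority.find? (fun label => PySem.Set.contains matched label)).getD "general")

-- ===== PRECONDITION & SPEC =====
def Spec_infer_protocol_type_py (filename : String) (out : String) : Prop := out = infer_protocol_type_py_alt filename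
instance (filename : String) (out : String) : Decidable (Spec_infer_protocol_type_py filename out) := by unfold Spec_infer_protocol_type_py; infer_instance

-- ===== CLAIM (what is proved, stated in full; the proofs are below) =====
def Claim_equal_infer_protocol_type_py : Prop := ∀ (filename : String), Dom_infer_protocol_type_py filename → Spec_infer_protocol_type_py filename (infer_protocol_type_py filename)

-- ===== LEMMAS AND PROOFS =====
theorem pv_contains_add (s : PySem.Set String) (x L : String) :
    PySem.Set.contains (PySem.Set.add s x) L = (PySem.Set.contains s L || L == x) := by
  rw [Bool.eq_iff_iff]
  simp [PySem.Set.mem_add]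

theorem pv_contains_fold (c : String × String → Bool) (l : List (String × String))
    (s0 : PySem.Set String) (L : String) :
    PySem.Set.contains
        (l.foldl (fun s p => if c p then PySem.Set.add s p.2 else s) s0) L
      = (PySem.Set.contains s0 L || l.any (fun p => c p && (L == p.2))) := by
  induction l generalizing s0 with
  | nil => simp
  | cons p t ih =>
    simp only [List.foldl_cons, List.any_cons, ih]
    by_cases h : c p = true
    · simp only [if_pos h, pv_contains_add, Bool.or_assoc, Bool.or_comm, Bool.or_left_comm]
      rw [Bool.eq_iff_iff]; simp [h]
    · simp [h]

-- ===== VERDICT (by name: the statement is the Claim_ definition above) =====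
theorem infer_protocol_type_py_spec : Claim_equal_infer_protocol_type_py := by
  intro filename _
  unfold Spec_infer_protocol_type_py infer_protocol_type_py infer_protocol_type_py_alt
  simp only [pvKeywordLabels, pvPriority,
    pv_contains_fold (fun p => PySem.Str.isIn p.1 (PySem.Str.lower filename)),
    List.any_cons, List.any_nil]
  simp only [List.find?, PySem.Set.empty, PySem.Set.contains_eq_listContains, List.contains,
    beq_self_eq_true, Bool.and_true, Bool.or_false]
  simp only [show ("menopause" == "weight_management") = false from rfl,
    show ("menopause" == "diabetes") = false from rfl,
    show ("menopause" == "thyroid") = false from rfl,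
    show ("menopause" == "sleep") = false from rfl,
    show ("weight_management" == "menopause") = false from rfl,
    show ("weight_management" == "diabetes") = false from rfl,
    show ("weight_management" == "thyroid") = false from rfl,
    show ("weight_management" == "sleep") = false from rfl,
    show ("diabetes" == "menopause") = false from rfl,
    show ("diabetes" == "weight_management") = false from rfl,
    show ("diabetes" == "thyroid") = false from rfl,
    show ("diabetes" == "sleep") = false from rfl,
    show ("thyroid" == "menopause") = false from rfl,
    show ("thyroid" == "weight_management") = false from rfl,
    show ("thyroid" == "diabetes") = false from rfl,
    show ("thyroid" == "sleep") = false from rfl,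
    show ("sleep" == "menopause") = false from rfl,
    show ("sleep" == "weight_management") = false from rfl,
    show ("sleep" == "diabetes") = false from rfl,
    show ("sleep" == "thyroid") = false from rfl,
    Bool.and_false, Bool.or_false, Bool.false_or]
  simp only [List.elem_nil, Bool.false_or]
  generalize (PySem.Str.isIn "menopause" (PySem.Str.lower filename) ||
    (PySem.Str.isIn "hormone" (PySem.Str.lower filename) ||
      PySem.Str.isIn "hrt" (PySem.Str.lower filename))) = b1
  generalize (PySem.Str.isIn "weight" (PySem.Str.lower filename) ||
    (PySem.Str.isIn "obesity" (PySem.Str.lower filename) ||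
      (PySem.Str.isIn "glp1" (PySem.Str.lower filename) ||
        PySem.Str.isIn "semaglutide" (PySem.Str.lower filename)))) = b2
  generalize (PySem.Str.isIn "diabetes" (PySem.Str.lower filename) ||
    (PySem.Str.isIn "glucose" (PySem.Str.lower filename) ||
      PySem.Str.isIn "insulin" (PySem.Str.lower filename))) = b3
  generalize (PySem.Str.isIn "thyroid" (PySem.Str.lower filename) ||
    (PySem.Str.isIn "tsh" (PySem.Str.lower filename) ||
      PySem.Str.isIn "t4" (PySem.Str.lower filename))) = b4
  generalize PySem.Str.isIn "sleep" (PySem.Str.lower filename) = b5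
  cases b1 <;> cases b2 <;> cases b3 <;> cases b4 <;> cases b5 <;> rfl
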